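-- pv_equiv track=rewrite | github.com/MohamedXploit/MailGuard | mailguard/scanner.py | _expand_check_dependencies
-- ===== SOURCE A (Python) =====
-- def _expand_check_dependencies(checks: set[str]) -> set[str]:
--     normalized = {item.lower() for item in checks}
--     if "bimi" in normalized:
--         normalized.add("dmarc")
--     if "smtp" in normalized:
--         normalized.update({"mx", "mta-sts"})
--     if "reputation" in normalized:
--         normalized.add("mx")
--     return normalized
-- ===== SOURCE B (Python) =====
-- _DEPS = (
--     ("bimi", ("dmarc",)),
--     ("smtp", ("mx", "mta-sts")),
--     ("reputation", ("mx",)),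
-- )
--
--
-- def _sweep(result):
--     """One pass over the dependency graph; returns True if anything was added."""
--     changed = False
--     for trigger, deps in _DEPS:
--         if trigger in result:
--             for dep in deps:
--                 if dep not in result:
--                     result.add(dep)
--                     changed = True
--     return changed
--
--
-- def _expand_check_dependencies(checks: set[str]) -> set[str]:
--     # Compute the dependency closure by sweeping the graph to a fixpoint.
--     result = {item.lower() for item in checks}
--     while _sweep(result):
--         pass
--     return result
-- ===== Notes on version B (the rewrite author's own statement) =====
-- stated objective: alternative
-- what changed: Replaces the three one-shot hardcoded conditional branches with a fixpoint iteration: a sweep over a constant trigger->deps graph is repeated until no new element is added, computing the dependency closure (correct for A's depth-1 graph and also for transitive chains).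
import Mathlib
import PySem

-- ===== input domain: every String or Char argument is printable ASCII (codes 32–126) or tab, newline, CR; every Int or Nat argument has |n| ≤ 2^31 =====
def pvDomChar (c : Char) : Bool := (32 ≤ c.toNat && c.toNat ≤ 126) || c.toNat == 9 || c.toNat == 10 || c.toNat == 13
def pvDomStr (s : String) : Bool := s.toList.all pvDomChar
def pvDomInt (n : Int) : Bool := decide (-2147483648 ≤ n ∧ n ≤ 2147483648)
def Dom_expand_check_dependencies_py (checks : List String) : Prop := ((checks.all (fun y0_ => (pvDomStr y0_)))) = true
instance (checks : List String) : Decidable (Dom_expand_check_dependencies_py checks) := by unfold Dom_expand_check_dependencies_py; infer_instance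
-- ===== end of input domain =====

-- B computes the same expansion as a fixpoint sweep over a constant dependency graph (alternative algorithm, same cost).
-- ===== PORT A =====
def expand_check_dependencies_py (checks : List String) : List String :=
  let normalized : PySem.Set String := PySem.Set.ofList (checks.map PySem.Str.lower)
  let normalized := if PySem.Set.contains normalized "bimi" then PySem.Set.add normalized "dmarc" else normalized
  let normalized := if PySem.Set.contains normalized "smtp" then PySem.Set.update normalized ["mx", "mta-sts"] else normalized
  let normalized := if PySem.Set.contains normalized "reputation" then PySem.Set.add normalized "mx" else normalized
  normalized

-- ===== PORT B =====
-- the constant dependency graph _DEPS (tuple of pairs -> list of pairs)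
def pvDepTable : List (String × List String) :=
  [("bimi", ["dmarc"]), ("smtp", ["mx", "mta-sts"]), ("reputation", ["mx"])]

-- _sweep: one pass over the graph; returns the grown set and the changed flag
def pvSweep (s : PySem.Set String) : PySem.Set String × Bool :=
  pvDepTable.foldl
    (fun acc td =>
      if PySem.Set.contains acc.1 td.1 then
        td.2.foldl
          (fun acc2 dep =>
            if PySem.Set.contains acc2.1 dep then acc2
            else (PySem.Set.add acc2.1 dep, true))
          acc
      else acc)
    (s, false)

-- the 'while _sweep(result): pass' loop; fuel 3 is exact: nothing a sweep adds is a
-- trigger, so the second sweep never changes the set and the loop stops (proved below).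
def pvLoop : Nat → PySem.Set String → PySem.Set String
  | 0, s => s
  | n + 1, s =>
    let r := pvSweep s
    if r.2 then pvLoop n r.1 else r.1

def expand_check_dependencies_py_alt (checks : List String) : List String :=
  pvLoop 3 (PySem.Set.ofList (checks.map PySem.Str.lower))

-- ===== PRECONDITION & SPEC =====
def Spec_expand_check_dependencies_py (checks : List String) (out : List String) : Prop := out = expand_check_dependencies_py_alt checks
instance (checks : List String) (out : List String) : Decidable (Spec_expand_check_dependencies_py checks out) := by unfold Spec_expand_check_dependencies_py; infer_instance

-- ===== CLAIM (what is proved, stated in full; the proofs are below) =====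
def Claim_equal_expand_check_dependencies_py : Prop := ∀ (checks : List String), Dom_expand_check_dependencies_py checks → Spec_expand_check_dependencies_py checks (expand_check_dependencies_py checks)

-- ===== LEMMAS AND PROOFS =====

-- one sweep computes exactly A's three conditional expansions
theorem pvSweep_fst (s : PySem.Set String) :
    (pvSweep s).1 =
      (let s1 := if PySem.Set.contains s "bimi" then PySem.Set.add s "dmarc" else s
       let s2 := if PySem.Set.contains s1 "smtp" then PySem.Set.update s1 ["mx", "mta-sts"] else s1
       if PySem.Set.contains s2 "reputation" then PySem.Set.add s2 "mx" else s2) := by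
  simp only [pvSweep, pvDepTable, List.foldl, PySem.Set.update]
  split_ifs <;> simp_all

-- membership after one sweep
theorem mem_pvSweep (s : PySem.Set String) (x : String) :
    x ∈ (pvSweep s).1 ↔
      x ∈ s ∨ (x = "dmarc" ∧ "bimi" ∈ s) ∨ ((x = "mx" ∨ x = "mta-sts") ∧ "smtp" ∈ s) ∨
        (x = "mx" ∧ "reputation" ∈ s) := by
  rw [pvSweep_fst]
  simp only [PySem.Set.update, List.foldl]
  split_ifs <;> simp_all [PySem.Set.mem_add] <;> tauto

-- a sweep of a dependency-closed set changes nothing and reports changed = false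
theorem pvSweep_of_closed (s : PySem.Set String)
    (h1 : "bimi" ∈ s → "dmarc" ∈ s)
    (h2 : "smtp" ∈ s → "mx" ∈ s)
    (h3 : "smtp" ∈ s → "mta-sts" ∈ s)
    (h4 : "reputation" ∈ s → "mx" ∈ s) :
    pvSweep s = (s, false) := by
  simp only [pvSweep, pvDepTable, List.foldl]
  by_cases hb : "bimi" ∈ s <;> by_cases hs : "smtp" ∈ s <;> by_cases hr : "reputation" ∈ s <;>
    simp_all

-- the second sweep is already at the fixpoint
theorem pvSweep_fix (s : PySem.Set String) :
    pvSweep (pvSweep s).1 = ((pvSweep s).1, false) := by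
  apply pvSweep_of_closed <;> intro h <;> rw [mem_pvSweep] at h ⊢ <;> tauto

-- the loop stops after at most two sweeps, returning the first sweep's set
theorem pvLoop_three (s : PySem.Set String) : pvLoop 3 s = (pvSweep s).1 := by
  simp [pvLoop, pvSweep_fix s]


-- ===== VERDICT (by name: the statement is the Claim_ definition above) =====
theorem expand_check_dependencies_py_spec : Claim_equal_expand_check_dependencies_py := by
  intro checks _
  unfold Spec_expand_check_dependencies_py expand_check_dependencies_py
    expand_check_dependencies_py_alt
  rw [pvLoop_three, pvSweep_fst]
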